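-- pv_equiv track=rewrite | github.com/miliar/Code_Jam_Webscraper | solutions_python/Problem_199/3959.py | possible_flips
-- ===== SOURCE A (Python) =====
-- def possible_flips(s, k):
-- 	'''
-- 	if k = len(s), None
-- 	range(0, len(s) - k + 1)
-- 	- i when s[i..i+k] all +
-- 	'''
-- 	#if len(s) == k:
-- 	#	return set()
-- 	#else:
-- 	p = set()
-- 	for i in range(0, len(s) - k + 1):
-- 		for j in range(i, i+k):
-- 			if s[j] == '-':
-- 				p.add(i)
-- 				break
-- 	return p
-- ===== SOURCE B (Python) =====
-- def possible_flips(s, k):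
--     if k <= 0:
--         return set()
--     pref = [0]
--     for c in s:
--         pref.append(pref[-1] + (c == '-'))
--     return {i for i in range(0, len(s) - k + 1) if pref[i + k] - pref[i] > 0}
-- ===== Notes on version B (the rewrite author's own statement) =====
-- stated objective: faster
-- what changed: Replaces A's rescan of each length-k window for a '-' by a single prefix-sum pass counting '-', so each window is tested in O(1) instead of O(k).
import Mathlib
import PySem

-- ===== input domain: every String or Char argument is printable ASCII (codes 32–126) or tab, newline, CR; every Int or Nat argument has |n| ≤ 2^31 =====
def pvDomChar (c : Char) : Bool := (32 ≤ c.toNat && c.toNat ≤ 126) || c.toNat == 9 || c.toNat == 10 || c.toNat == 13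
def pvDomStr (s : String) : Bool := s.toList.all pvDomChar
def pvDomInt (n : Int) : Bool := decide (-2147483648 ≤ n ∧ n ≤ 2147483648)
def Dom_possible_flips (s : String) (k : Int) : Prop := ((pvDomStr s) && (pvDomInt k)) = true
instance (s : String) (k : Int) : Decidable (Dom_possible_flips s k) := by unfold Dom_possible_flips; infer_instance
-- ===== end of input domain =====

-- B replaces A's O(n*k) rescan of every window by a prefix-sum count of '-', testing each window in O(1); a timing run measures the speed-up.

-- ===== PORT A =====
-- inner 'for j in range(i, i+k): if s[j] == '-': p.add(i); break' (none = IndexError, unreachable here)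
def pfInnerA (cs : List Char) (js : List Int) (i : Int) (p : PySem.Set Int) : PySem.Set Int :=
  match js with
  | [] => p
  | j :: rest =>
    match PySem.List.pyGet? cs j with
    | some c => if c = '-' then PySem.Set.add p i else pfInnerA cs rest i p
    | none => p

def possible_flips (s : String) (k : Int) : List Int :=
  (PySem.List.pyRange 0 (PySem.Str.len s - k + 1) 1).foldl
    (fun p i => pfInnerA s.toList (PySem.List.pyRange i (i + k) 1) i p)
    PySem.Set.empty

-- ===== PORT B =====
def possible_flips_alt (s : String) (k : Int) : List Int :=
  if k ≤ 0 then PySem.Set.empty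
  else
    let pref : List Int :=
      s.toList.foldl
        (fun acc c => acc ++ [PySem.List.pyGetD acc (-1) 0 + (if c = '-' then 1 else 0)])
        [0]
    PySem.Set.ofList
      ((PySem.List.pyRange 0 (PySem.Str.len s - k + 1) 1).filter
        (fun i => decide (PySem.List.pyGetD pref (i + k) 0 - PySem.List.pyGetD pref i 0 > 0)))

-- ===== PRECONDITION & SPEC =====
def Spec_possible_flips (s : String) (k : Int) (out : List Int) : Prop := out = possible_flips_alt s k
instance (s : String) (k : Int) (out : List Int) : Decidable (Spec_possible_flips s k out) := by unfold Spec_possible_flips; infer_instance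

-- ===== CLAIM (what is proved, stated in full; the proofs are below) =====
def Claim_equal_possible_flips : Prop := ∀ (s : String) (k : Int), Dom_possible_flips s k → Spec_possible_flips s k (possible_flips s k)

-- ===== LEMMAS AND PROOFS =====

-- the prefix list Source B builds is the list of '-'-counts of the prefixes
theorem pf_pref_eq (cs : List Char) :
    cs.foldl (fun acc c => acc ++ [PySem.List.pyGetD acc (-1) 0 + (if c = '-' then 1 else 0)]) [0]
    = (List.range (cs.length + 1)).map (fun t => ((cs.take t).count '-' : Int)) := by
  induction cs using List.reverseRecOn with
  | nil => simp
  | append_singleton ds c ih =>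
    rw [List.foldl_append, ih, List.foldl_cons, List.foldl_nil]
    have hsplit : (List.range (ds.length + 1)).map (fun t => (((ds.take t).count '-' : Int)))
        = (List.range ds.length).map (fun t => (((ds.take t).count '-' : Int)))
          ++ [((ds.take ds.length).count '-' : Int)] := by
      rw [List.range_succ, List.map_append]; simp
    rw [hsplit, PySem.List.pyGetD_neg_one_append_singleton]
    have hsplit2 : List.range ((ds ++ [c]).length + 1)
        = List.range (ds.length + 1) ++ [ds.length + 1] := by
      simp [List.range_succ]
    rw [hsplit2, List.map_append]
    have hmap : (List.range (ds.length + 1)).map (fun t => ((((ds ++ [c]).take t).count '-' : Int)))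
        = (List.range (ds.length + 1)).map (fun t => (((ds.take t).count '-' : Int))) := by
      apply List.map_congr_left
      intro t ht
      rw [List.take_append_of_le_length (by simp at ht; omega)]
    rw [hmap, hsplit]
    simp
    have ht : List.take (ds.length + 1) (ds ++ [c]) = ds ++ [c] :=
      List.take_of_length_le (by simp)
    rw [ht, List.count_append]
    by_cases hc : c = '-' <;> simp [hc]

-- reading the prefix list at a valid index
theorem pf_prefGet (cs : List Char) (t : Int) (h0 : 0 ≤ t) (h1 : t ≤ (cs.length : Int)) :
    PySem.List.pyGetD ((List.range (cs.length + 1)).map (fun u => ((cs.take u).count '-' : Int))) t 0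
    = ((cs.take t.toNat).count '-' : Int) := by
  rw [PySem.List.pyGetD_eq_getElem _ _ h0 (by simp; omega)]
  simp

-- A's inner loop with break, on in-range indices
theorem pf_inner_eq (cs : List Char) (i : Int) :
    ∀ (js : List Int) (p : PySem.Set Int),
      (∀ j ∈ js, 0 ≤ j ∧ j < (cs.length : Int)) →
      pfInnerA cs js i p =
        if js.any (fun j => PySem.List.pyGetD cs j ' ' == '-') then PySem.Set.add p i else p := by
  intro js
  induction js with
  | nil => intro p _; simp [pfInnerA]
  | cons j rest ih =>
    intro p h
    obtain ⟨h0, h1⟩ := h j (by simp)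
    have hget : PySem.List.pyGet? cs j = some cs[j.toNat] :=
      PySem.List.pyGet?_eq_some_getElem cs h0 h1
    have hgetD : PySem.List.pyGetD cs j ' ' = cs[j.toNat] :=
      PySem.List.pyGetD_eq_getElem cs ' ' h0 h1
    simp only [pfInnerA, hget]
    by_cases hc : cs[j.toNat] = '-'
    · simp [hc, hgetD]
    · simp only [List.any_cons, hgetD]
      rw [if_neg hc, ih p (fun x hx => h x (List.mem_cons_of_mem _ hx))]
      simp [hc]

-- accumulating fresh elements into a Python set = append of the filtered list
theorem pf_foldl_filter (P : Int → Bool) :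
    ∀ (l : List Int) (p : List Int), l.Nodup → (∀ x ∈ l, x ∉ p) →
      l.foldl (fun acc i => if P i then PySem.Set.add acc i else acc) p = p ++ l.filter P := by
  intro l
  induction l with
  | nil => simp
  | cons x rest ih =>
    intro p hnd hfr
    simp only [List.foldl_cons]
    by_cases hP : P x
    · rw [if_pos hP]
      have hx : x ∉ p := hfr x (by simp)
      have hadd : PySem.Set.add p x = p ++ [x] := by simp [PySem.Set.add, hx]
      rw [hadd, ih (p ++ [x]) hnd.of_cons ?_]
      · simp [hP]
      · intro y hy
        simp only [List.mem_append, List.mem_singleton]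
        rintro (hyp | rfl)
        · exact hfr y (List.mem_cons_of_mem _ hy) hyp
        · exact (List.nodup_cons.mp hnd).1 hy
    · rw [if_neg hP, ih p hnd.of_cons (fun y hy => hfr y (List.mem_cons_of_mem _ hy))]
      simp [hP]

theorem pf_foldl_add :
    ∀ (l p : List Int), l.Nodup → (∀ x ∈ l, x ∉ p) → l.foldl PySem.Set.add p = p ++ l := by
  intro l
  induction l with
  | nil => simp
  | cons x rest ih =>
    intro p hnd hfr
    simp only [List.foldl_cons]
    have hx : x ∉ p := hfr x (by simp)
    have hadd : PySem.Set.add p x = p ++ [x] := by simp [PySem.Set.add, hx]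
    rw [hadd, ih (p ++ [x]) hnd.of_cons ?_]
    · simp
    · intro y hy
      simp only [List.mem_append, List.mem_singleton]
      rintro (hyp | rfl)
      · exact hfr y (List.mem_cons_of_mem _ hy) hyp
      · exact (List.nodup_cons.mp hnd).1 hy

theorem pf_ofList_nodup {l : List Int} (h : l.Nodup) : PySem.Set.ofList l = l := by
  have : PySem.Set.ofList l = l.foldl PySem.Set.add [] := rfl
  rw [this, pf_foldl_add l [] h (by simp)]
  simp

-- the two window tests agree
theorem pf_pred_eq (cs : List Char) (k i : Int) (hk : 0 < k) (hi : 0 ≤ i)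
    (hik : i + k ≤ (cs.length : Int)) :
    ((PySem.List.pyRange i (i + k)).any (fun j => PySem.List.pyGetD cs j ' ' == '-'))
    = decide ((((cs.take (i + k).toNat).count '-' : Int) - ((cs.take i.toNat).count '-' : Int)) > 0) := by
  have htn : (i + k).toNat = i.toNat + k.toNat := by omega
  have hcount : (((cs.take (i + k).toNat).count '-' : Int) - ((cs.take i.toNat).count '-' : Int))
      = (((cs.drop i.toNat).take k.toNat).count '-' : Int) := by
    rw [htn, List.take_add, List.count_append]; push_cast; ring
  rw [hcount, Bool.eq_iff_iff]
  simp only [List.any_eq_true, beq_iff_eq, decide_eq_true_eq]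
  have hseglen : ((cs.drop i.toNat).take k.toNat).length = k.toNat := by
    simp; omega
  constructor
  · rintro ⟨j, hj, hj'⟩
    rw [PySem.List.mem_pyRange_one] at hj
    have hjd : PySem.List.pyGetD cs j ' ' = cs[j.toNat]'(by omega) :=
      PySem.List.pyGetD_eq_getElem cs ' ' (by omega) (by omega)
    have hmem : '-' ∈ (cs.drop i.toNat).take k.toNat := by
      rw [List.mem_iff_getElem]
      refine ⟨j.toNat - i.toNat, by omega, ?_⟩
      rw [List.getElem_take, List.getElem_drop]
      have hidx : i.toNat + (j.toNat - i.toNat) = j.toNat := by omega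
      rw [hjd] at hj'
      simpa [hidx] using hj'
    have := List.count_pos_iff.mpr hmem
    omega
  · intro hpos
    have hmem : '-' ∈ (cs.drop i.toNat).take k.toNat := List.count_pos_iff.mp (by omega)
    rw [List.mem_iff_getElem] at hmem
    obtain ⟨m, hm, hm'⟩ := hmem
    rw [hseglen] at hm
    refine ⟨i + (m : Int), ?_, ?_⟩
    · rw [PySem.List.mem_pyRange_one]; omega
    · have hjd : PySem.List.pyGetD cs (i + (m : Int)) ' ' = cs[(i + (m : Int)).toNat]'(by omega) :=
        PySem.List.pyGetD_eq_getElem cs ' ' (by omega) (by omega)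
      rw [hjd]
      rw [List.getElem_take, List.getElem_drop] at hm'
      have hidx : (i + (m : Int)).toNat = i.toNat + m := by omega
      simpa [hidx] using hm'


-- ===== VERDICT (by name: the statement is the Claim_ definition above) =====
theorem possible_flips_spec : Claim_equal_possible_flips := by
  intro s k _
  unfold Spec_possible_flips possible_flips possible_flips_alt
  by_cases hk : k ≤ 0
  · rw [if_pos hk]
    rw [PySem.List.foldl_congr_mem _ _ (fun p _ => p) _ ?_]
    · exact List.foldl_fixed _
    · intro acc x _
      rw [PySem.List.pyRange_one_eq_nil (by omega)]
      rfl
  · rw [if_neg hk]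
    have hk' : 0 < k := by omega
    have hlen : PySem.Str.len s = (s.toList.length : Int) := by simp [PySem.Str.len]
    rw [hlen]
    simp only [pf_pref_eq]
    rw [PySem.List.foldl_congr_mem _ _
      (fun p i => if (PySem.List.pyRange i (i + k)).any
          (fun j => PySem.List.pyGetD s.toList j ' ' == '-') then PySem.Set.add p i else p) _ ?_]
    · rw [pf_foldl_filter _ _ _ (PySem.List.nodup_pyRange_one _ _)
        (by intro x _; simp [PySem.Set.empty])]
      rw [List.filter_congr (q := fun i => decide
          (PySem.List.pyGetD ((List.range (s.toList.length + 1)).map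
              (fun t => ((s.toList.take t).count '-' : Int))) (i + k) 0
            - PySem.List.pyGetD ((List.range (s.toList.length + 1)).map
              (fun t => ((s.toList.take t).count '-' : Int))) i 0 > 0)) ?_]
      · rw [pf_ofList_nodup ((PySem.List.nodup_pyRange_one _ _).filter _)]
        simp [PySem.Set.empty]
      · intro i hi
        rw [PySem.List.mem_pyRange_one] at hi
        rw [pf_pred_eq s.toList k i hk' (by omega) (by omega)]
        beta_reduce
        rw [pf_prefGet s.toList (i + k) (by omega) (by omega),
          pf_prefGet s.toList i (by omega) (by omega)]
    · intro acc x hx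
      rw [PySem.List.mem_pyRange_one] at hx
      exact pf_inner_eq s.toList x _ acc
        (fun j hj => by rw [PySem.List.mem_pyRange_one] at hj; omega)
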